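-- pv_equiv track=rewrite | github.com/Zibrovdu/dash_server_project | passport/load_data.py | get_months
-- ===== SOURCE A (Python) =====
-- def get_period_month(year, month):
--     """
--     Синтаксис:
--     ----------
--
--     **get_period_month** (year, month)
--
--     Описание:
--     ----------
--     Функция принимает на вход номер месяца и год. Возвращает строку 'Месяц год'.
--
--     Параметры:
--     ----------
--         **year**: *int* - год
--
--         **month**: *int* - номер месяца
--
--     Returns:
--     ----------
--         **String**
--     """
--     months = ['', 'Январь', 'Февраль', 'Март', 'Апрель', 'Май', 'Июнь', 'Июль', 'Август', 'Сентябрь', 'Октябрь',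
--               'Ноябрь', 'Декабрь']
--     period = ' '.join([str(months[month]), str(year)])
--
--     return period
--
-- def get_months(start_month, start_year, finish_month, finish_year):
--     """
--     Синтаксис:
--     ----------
--     **get_months** (start_month, start_year, finish_month, finish_year)
--
--     Описание:
--     ----------
--
--     Функция принимает на вход период в виде 4-х параметров (номер месяца и год начала, номер месяца и год окончания.
--     Возвращает список словарей, содержащих информацию о месяце, годе и номере месяца для последующей загрузки в
--     компонент dcc.Dropdown.
--
--     Параметры:
--     ----------
--         **start_month**: *int* - номер месяца начала периода
--
--         **start_year**: *int* - год начала периода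
--
--         **finish_month**: *int* - номер месяца окончания периода
--
--         **finish_year**: *int* - год окончания периода
--
--     Returns:
--     ----------
--         **List**
--     """
--     start_period = [
--         {"label": f'{get_period_month(year=start_year, month=i)}', "value": "_".join([str(i), str(start_year)])}
--         for i in range(start_month, 13)]
--     end_period = [
--         {"label": f'{get_period_month(year=finish_year, month=i)}', "value": "_".join([str(i), str(finish_year)])}
--         for i in range(1, finish_month + 1)]
--
--     if finish_year - start_year <= 1:
--         for item in end_period:
--             start_period.append(item)
--         start_period.reverse()
--     else:
--         years_list = []
--         for count in range(1, finish_year - start_year):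
--             years_list.insert(count, start_year + count)
--
--         addition_period = []
--         for year in years_list:
--             addition_period.append(
--                 [{"label": f'{get_period_month(year=year, month=i)}', "value": "_".join([str(i), str(year)])} for i in
--                  range(1, 13)])
--
--         for period in addition_period:
--             for item in period:
--                 start_period.append(item)
--         for item in end_period:
--             start_period.append(item)
--         start_period.reverse()
--
--     return start_period
-- ===== SOURCE B (Python) =====
-- def get_period_month(year, month):
--     months = ['', 'Январь', 'Февраль', 'Март', 'Апрель', 'Май', 'Июнь', 'Июль', 'Август', 'Сентябрь', 'Октябрь',
--               'Ноябрь', 'Декабрь']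
--     return ' '.join([str(months[month]), str(year)])
--
-- def _entry_at(k, start_month, start_year, finish_month, finish_year):
--     # (year, month) of the k-th output entry, computed arithmetically from k
--     n_end = max(0, finish_month)
--     n_mid = 12 * max(0, finish_year - start_year - 1)
--     if k < n_end:
--         year, month = finish_year, finish_month - k
--     elif k < n_end + n_mid:
--         j = k - n_end
--         year, month = finish_year - 1 - j // 12, 12 - j % 12
--     else:
--         j = k - n_end - n_mid
--         year, month = start_year, 12 - j
--     return {"label": f'{get_period_month(year=year, month=month)}',
--             "value": "_".join([str(month), str(year)])}
--
-- def get_months(start_month, start_year, finish_month, finish_year):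
--     total = max(0, finish_month) + 12 * max(0, finish_year - start_year - 1) + max(0, 13 - start_month)
--     return [_entry_at(k, start_month, start_year, finish_month, finish_year) for k in range(total)]
-- ===== Notes on version B (the rewrite author's own statement) =====
-- stated objective: alternative
-- what changed: B computes the k-th output entry's (year, month) directly by index arithmetic (floor division/modulo on k) in a single comprehension over range(total), instead of A's branch on the year gap, staged segment lists, insert loop, list-of-lists flatten and final reverse.
import Mathlib
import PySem

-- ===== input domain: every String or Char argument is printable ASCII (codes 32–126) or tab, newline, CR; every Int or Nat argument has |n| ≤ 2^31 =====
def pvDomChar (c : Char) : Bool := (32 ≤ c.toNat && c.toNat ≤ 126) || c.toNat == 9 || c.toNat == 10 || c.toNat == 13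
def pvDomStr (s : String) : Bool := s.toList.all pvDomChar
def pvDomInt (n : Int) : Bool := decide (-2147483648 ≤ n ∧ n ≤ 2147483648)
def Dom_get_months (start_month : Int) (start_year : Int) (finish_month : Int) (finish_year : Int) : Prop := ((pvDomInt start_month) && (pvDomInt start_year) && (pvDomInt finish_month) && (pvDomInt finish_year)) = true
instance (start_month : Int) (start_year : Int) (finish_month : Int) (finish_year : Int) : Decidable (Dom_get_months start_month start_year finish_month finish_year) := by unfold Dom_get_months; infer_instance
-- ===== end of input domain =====

-- B computes each entry's (year, month) arithmetically from its output index k (floor division /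
-- modulo), replacing A's year-gap branch, staged lists, insert loop, flatten and final reverse; objective: alternative.


-- ===== PORT A =====
-- module helper get_period_month, shared by both Pythons; months[month] uses Python indexing
-- (pyGet?; getD "" stands for the IndexError case, which Pre_get_months excludes)
def pvMonths : List String := ["", "Январь", "Февраль", "Март", "Апрель", "Май", "Июнь", "Июль",
  "Август", "Сентябрь", "Октябрь", "Ноябрь", "Декабрь"]

def get_period_month (year : Int) (month : Int) : String :=
  ((PySem.List.pyGet? pvMonths month).getD "") ++ " " ++ PySem.Int.toStr year

-- one dropdown dict {"label": …, "value": "i_year"} (the identical expression in both Pythons)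
def pvEntry (year : Int) (i : Int) : List (String × String) :=
  [("label", get_period_month year i), ("value", PySem.Int.toStr i ++ "_" ++ PySem.Int.toStr year)]

def get_months (start_month : Int) (start_year : Int) (finish_month : Int) (finish_year : Int) : List (List (String × String)) :=
  let start_period := (PySem.List.pyRange start_month 13 1).map (fun i => pvEntry start_year i)
  let end_period := (PySem.List.pyRange 1 (finish_month + 1) 1).map (fun i => pvEntry finish_year i)
  if finish_year - start_year ≤ 1 then
    (end_period.foldl (fun acc item => acc ++ [item]) start_period).reverse
  else
    let years_list := (PySem.List.pyRange 1 (finish_year - start_year) 1).foldl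
      (fun acc count => PySem.List.insert acc count (start_year + count)) []
    let addition_period := years_list.foldl
      (fun acc year => acc ++ [(PySem.List.pyRange 1 13 1).map (fun i => pvEntry year i)]) []
    let sp := addition_period.foldl (fun acc period => period.foldl (fun a item => a ++ [item]) acc) start_period
    let sp := end_period.foldl (fun acc item => acc ++ [item]) sp
    sp.reverse

-- ===== PORT B =====
-- Source B's _entry_at: the (year, month) of the k-th output entry, by index arithmetic on k
def pvEntryAt (start_month : Int) (start_year : Int) (finish_month : Int) (finish_year : Int) (k : Int) : List (String × String) :=
  let n_end := max 0 finish_month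
  let n_mid := 12 * max 0 (finish_year - start_year - 1)
  if k < n_end then
    pvEntry finish_year (finish_month - k)
  else if k < n_end + n_mid then
    pvEntry (finish_year - 1 - PySem.Int.floordiv (k - n_end) 12) (12 - PySem.Int.mod (k - n_end) 12)
  else
    pvEntry start_year (12 - (k - n_end - n_mid))

def get_months_alt (start_month : Int) (start_year : Int) (finish_month : Int) (finish_year : Int) : List (List (String × String)) :=
  let total := max 0 finish_month + 12 * max 0 (finish_year - start_year - 1) + max 0 (13 - start_month)
  (PySem.List.pyRange 0 total 1).map (fun k => pvEntryAt start_month start_year finish_month finish_year k)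

-- ===== PRECONDITION & SPEC =====
-- Pre_ excludes exactly the inputs where Python A raises IndexError in months[month]:
-- start_month ≤ -14 (a negative index past the front of the 13-element months list) or
-- finish_month ≥ 13 (index past its end). B raises there too.
def Pre_get_months (start_month : Int) (start_year : Int) (finish_month : Int) (finish_year : Int) : Prop :=
  -13 ≤ start_month ∧ finish_month ≤ 12
instance (start_month : Int) (start_year : Int) (finish_month : Int) (finish_year : Int) : Decidable (Pre_get_months start_month start_year finish_month finish_year) := by unfold Pre_get_months; infer_instance
def pvWitness_get_months : Int × Int × Int × Int := (11, 2019, 2, 2022)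

def Spec_get_months (start_month : Int) (start_year : Int) (finish_month : Int) (finish_year : Int) (out : List (List (String × String))) : Prop := out = get_months_alt start_month start_year finish_month finish_year
instance (start_month : Int) (start_year : Int) (finish_month : Int) (finish_year : Int) (out : List (List (String × String))) : Decidable (Spec_get_months start_month start_year finish_month finish_year out) := by unfold Spec_get_months; infer_instance

-- ===== CLAIM (what is proved, stated in full; the proofs are below) =====
def Claim_equal_get_months : Prop := ∀ (start_month : Int) (start_year : Int) (finish_month : Int) (finish_year : Int), Dom_get_months start_month start_year finish_month finish_year → Pre_get_months start_month start_year finish_month finish_year → Spec_get_months start_month start_year finish_month finish_year (get_months start_month start_year finish_month finish_year)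

-- ===== LEMMAS AND PROOFS =====

-- proof-only common form: the output as the reverse of the three ascending segments
def pvStaged (start_month : Int) (start_year : Int) (finish_month : Int) (finish_year : Int) : List (List (String × String)) :=
  ((PySem.List.pyRange start_month 13 1).map (pvEntry start_year)
    ++ (PySem.List.pyRange (start_year + 1) finish_year 1).flatMap
         (fun y => (PySem.List.pyRange 1 13 1).map (pvEntry y))
    ++ (PySem.List.pyRange 1 (finish_month + 1) 1).map (pvEntry finish_year)).reverse

-- Python list.insert clamps an index ≥ len to an append
theorem pv_insert_of_len_le {α : Type} (xs : List α) (i : Int) (v : α)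
    (h : (xs.length : Int) ≤ i) : PySem.List.insert xs i v = xs ++ [v] := by
  have h0 : ¬ i < 0 := by omega
  simp [PySem.List.insert, PySem.List.sliceIndices, h0, min_eq_right h]

-- the years_list insert-loop builds the ascending list start_year+1 … finish_year-1
theorem pv_years_list (start_year : Int) (n : Int) :
    (PySem.List.pyRange 1 n 1).foldl
      (fun acc count => PySem.List.insert acc count (start_year + count)) []
    = (PySem.List.pyRange 1 n 1).map (fun c => start_year + c) := by
  rw [PySem.List.pyRange_one]
  generalize (n - 1).toNat = m
  induction m with
  | zero => simp
  | succ k ih =>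
      rw [List.range_succ]
      simp only [List.map_append, List.foldl_append, List.map_map, ih, List.foldl_cons,
        List.foldl_nil, List.map_cons, List.map_nil]
      rw [pv_insert_of_len_le]
      simp

-- range shift: range(start_year+1, finish_year) = map (start_year + ·) range(1, finish_year - start_year)
theorem pv_range_shift (start_year finish_year : Int) :
    PySem.List.pyRange (start_year + 1) finish_year 1
    = (PySem.List.pyRange 1 (finish_year - start_year) 1).map (fun c => start_year + c) := by
  rw [PySem.List.pyRange_one, PySem.List.pyRange_one, List.map_map]
  have : finish_year - (start_year + 1) = finish_year - start_year - 1 := by ring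
  rw [this]
  exact List.map_congr_left (fun k _ => by simp; ring)

-- A equals the staged form
theorem pv_a_eq_staged (sm sy fm fy : Int) :
    get_months sm sy fm fy = pvStaged sm sy fm fy := by
  unfold get_months pvStaged
  by_cases h : fy - sy ≤ 1
  · rw [if_pos h, PySem.List.pyRange_one_eq_nil (by omega : fy ≤ sy + 1)]
    simp only [PySem.List.foldl_append_singleton_eq_self, List.flatMap_nil, List.append_nil]
  · rw [if_neg h, pv_range_shift, pv_years_list]
    simp only [PySem.List.foldl_append_singleton_eq_self, PySem.List.foldl_append_singleton_eq_map,
      List.nil_append]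
    rw [PySem.List.foldl_append_eq_flatMap (g := fun p => p)]
    simp [List.flatMap_def, Function.comp_def]

-- reverse of a mapped ascending range, as a map over List.range (descending by index)
theorem pv_rev_map {α : Type} (f : Int → α) (a b : Int) :
    ((PySem.List.pyRange a b 1).map f).reverse
    = (List.range (b - a).toNat).map (fun k : Nat => f (b - 1 - (k : Int))) := by
  apply List.ext_getElem
  · simp [PySem.List.length_pyRange_one]
  · intro i h1 h2
    simp only [List.getElem_reverse, List.getElem_map, List.length_reverse, List.length_map,
      PySem.List.length_pyRange_one, PySem.List.getElem_pyRange_one, List.getElem_range]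
    congr 1
    simp only [List.length_reverse, List.length_map, PySem.List.length_pyRange_one,
      List.length_range] at h1 h2
    omega

-- reverse of an ascending range itself
theorem pv_rev_range (a b : Int) :
    (PySem.List.pyRange a b 1).reverse
    = (List.range (b - a).toNat).map (fun k : Nat => b - 1 - (k : Int)) := by
  have h := pv_rev_map (fun x => x) a b
  simpa using h

-- the middle block: index arithmetic j ↦ (j / 12, j % 12) over 12·m indices equals
-- m descending blocks of 12 descending months
theorem pv_mid (y : Int) (m : Nat) :
    (List.range (12 * m)).map
      (fun j => pvEntry (y - ((j / 12 : Nat) : Int)) (12 - ((j % 12 : Nat) : Int)))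
    = (List.range m).flatMap
        (fun t : Nat => (List.range 12).map (fun i : Nat => pvEntry (y - (t : Int)) (12 - (i : Int)))) := by
  induction m with
  | zero => simp
  | succ n ih =>
      rw [show 12 * (n + 1) = 12 * n + 12 from by ring, List.range_add, List.map_append, ih,
        show List.range (n + 1) = List.range n ++ [n] from List.range_succ, List.flatMap_append]
      congr 1
      simp only [List.flatMap_cons, List.flatMap_nil, List.append_nil, List.map_map]
      apply List.map_congr_left
      intro i hi
      simp only [List.mem_range] at hi
      simp only [Function.comp_apply]
      have h1 : (12 * n + i) / 12 = n := by omega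
      have h2 : (12 * n + i) % 12 = i := by omega
      rw [h1, h2]

-- B equals the staged form
theorem pv_alt_eq_staged (sm sy fm fy : Int) :
    get_months_alt sm sy fm fy = pvStaged sm sy fm fy := by
  simp only [get_months_alt, pvStaged]
  have he : (0 : Int) ≤ max 0 fm := le_max_left 0 fm
  have hm : (0 : Int) ≤ 12 * max 0 (fy - sy - 1) := by
    have := le_max_left 0 (fy - sy - 1); omega
  have hs : (0 : Int) ≤ max 0 (13 - sm) := le_max_left 0 (13 - sm)
  rw [PySem.List.pyRange_one_append 0 (max 0 fm)
        (max 0 fm + 12 * max 0 (fy - sy - 1) + max 0 (13 - sm)) (by omega) (by omega),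
      PySem.List.pyRange_one_append (max 0 fm) (max 0 fm + 12 * max 0 (fy - sy - 1))
        (max 0 fm + 12 * max 0 (fy - sy - 1) + max 0 (13 - sm)) (by omega) (by omega),
      List.map_append, List.map_append, List.reverse_append, List.reverse_append]
  congr 1
  -- first segment = reversed end_period
  · rw [pv_rev_map (pvEntry fy) 1 (fm + 1), PySem.List.pyRange_one]
    have h1 : (max 0 fm - 0).toNat = (fm + 1 - 1).toNat := by omega
    rw [h1, List.map_map]
    apply List.map_congr_left
    intro k hk
    simp only [List.mem_range] at hk
    simp only [Function.comp_apply, pvEntryAt, zero_add]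
    rw [if_pos (by omega : (k : Int) < max 0 fm)]
    congr 1
    omega
  congr 1
  -- middle segment = reversed flatten of the full years
  · rw [List.reverse_flatMap, pv_rev_range (sy + 1) fy, List.flatMap_map, PySem.List.pyRange_one]
    have hmn : (max 0 fm + 12 * max 0 (fy - sy - 1) - max 0 fm).toNat
        = 12 * (fy - (sy + 1)).toNat := by omega
    rw [hmn, List.map_map]
    have hL : (List.range (12 * (fy - (sy + 1)).toNat)).map
        ((fun k => pvEntryAt sm sy fm fy k) ∘ fun k : Nat => max 0 fm + (k : Int))
        = (List.range (12 * (fy - (sy + 1)).toNat)).map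
          (fun j => pvEntry ((fy - 1) - ((j / 12 : Nat) : Int)) (12 - ((j % 12 : Nat) : Int))) := by
      apply List.map_congr_left
      intro j hj
      simp only [List.mem_range] at hj
      have hj' : (j : Int) < 12 * max 0 (fy - sy - 1) := by omega
      simp only [Function.comp_apply, pvEntryAt]
      rw [if_neg (by omega), if_pos (by omega)]
      have hx : max 0 fm + (j : Int) - max 0 fm = (j : Int) := by ring
      rw [hx]
      have hd : PySem.Int.floordiv (j : Int) 12 = ((j / 12 : Nat) : Int) := by
        exact_mod_cast PySem.Int.floordiv_natCast j 12
      have hmd : PySem.Int.mod (j : Int) 12 = ((j % 12 : Nat) : Int) := by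
        exact_mod_cast PySem.Int.mod_natCast j 12
      rw [hd, hmd]
    rw [hL, pv_mid (fy - 1)]
    rw [List.flatMap_def, List.flatMap_def]
    congr 1
  -- last segment = reversed start_period
  · rw [pv_rev_map (pvEntry sy) sm 13, PySem.List.pyRange_one]
    have h3 : (max 0 fm + 12 * max 0 (fy - sy - 1) + max 0 (13 - sm)
        - (max 0 fm + 12 * max 0 (fy - sy - 1))).toNat = (13 - sm).toNat := by omega
    rw [h3, List.map_map]
    apply List.map_congr_left
    intro k hk
    simp only [List.mem_range] at hk
    simp only [Function.comp_apply, pvEntryAt]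
    rw [if_neg (by omega), if_neg (by omega)]
    congr 1
    omega

-- ===== VERDICT (by name: the statement is the Claim_ definition above) =====
theorem get_months_spec : Claim_equal_get_months := by
  intro sm sy fm fy _ _
  exact (pv_a_eq_staged sm sy fm fy).trans (pv_alt_eq_staged sm sy fm fy).symm
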